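-- pv_equiv track=rewrite | github.com/Shylph/algorithm | src/main/java/y2018/m8/d28_block4/Solution.py | get_remove_target
-- ===== SOURCE A (Python) =====
-- def get_remove_target(board):
--     remove_target = [list(" " * len(board[i])) for i in range(len(board))]
--     for i in range(len(board) - 1):
--         for j in range(len(board[i]) - 1):
--             try:
--                 if board[i][j] == board[i + 1][j] and board[i + 1][j] == board[i + 1][j + 1] and board[i + 1][j + 1] == \
--                         board[i][j + 1]:
--                     remove_target[i][j] = "*"
--                     remove_target[i + 1][j] = "*"
--                     remove_target[i][j + 1] = "*"
--                     remove_target[i + 1][j + 1] = "*"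
--             except IndexError:
--                 continue
--     return remove_target
-- ===== SOURCE B (Python) =====
-- def get_remove_target(board):
--     # gather formulation: a cell is '*' iff some uniform 2x2 block covers it
--     def uni(i, j):
--         if not (0 <= i < len(board) - 1):
--             return False
--         row, nxt = board[i], board[i + 1]
--         if not (0 <= j < len(row) - 1 and j + 1 < len(nxt)):
--             return False
--         return row[j] == row[j + 1] == nxt[j] == nxt[j + 1]
--
--     return [["*" if (uni(i - 1, j - 1) or uni(i - 1, j)
--                      or uni(i, j - 1) or uni(i, j)) else " "
--              for j in range(len(row))]
--             for i, row in enumerate(board)]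
-- ===== Notes on version B (the rewrite author's own statement) =====
-- stated objective: alternative
-- what changed: B inverts the data flow: instead of scanning corners and scatter-marking four cells per uniform block into a mutable grid, B builds the output purely functionally, computing each cell independently by gathering over the (up to four) 2x2 blocks that cover it and testing whether any is uniform (jaggedness handled by an explicit bounds predicate instead of try/except).
import Mathlib
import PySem

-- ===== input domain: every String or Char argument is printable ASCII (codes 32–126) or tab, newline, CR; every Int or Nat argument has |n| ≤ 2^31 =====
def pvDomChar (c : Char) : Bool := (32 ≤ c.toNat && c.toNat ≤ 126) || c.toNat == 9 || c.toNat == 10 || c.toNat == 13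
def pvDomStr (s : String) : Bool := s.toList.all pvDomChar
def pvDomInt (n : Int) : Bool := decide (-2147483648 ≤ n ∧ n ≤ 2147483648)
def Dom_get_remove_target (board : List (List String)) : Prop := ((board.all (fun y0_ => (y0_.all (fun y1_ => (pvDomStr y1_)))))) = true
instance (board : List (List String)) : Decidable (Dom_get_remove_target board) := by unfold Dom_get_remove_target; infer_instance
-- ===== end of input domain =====

-- B inverts the data flow: A scatter-marks a mutable grid per uniform 2x2 corner; B computes
-- each output cell directly by gathering over the up-to-four blocks covering it (alternative).

-- ===== PORT A =====
-- A marks the four cells inline while scanning; board[i+1][j] / board[i+1][j+1] may raise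
-- IndexError on jagged rows (caught by `except: continue`), ported as the `none` match arms.
def get_remove_target (board : List (List String)) : List (List String) :=
  let init := (List.range board.length).map (fun i => List.replicate (board.getD i []).length " ")
  (List.range (board.length - 1)).foldl (fun g i =>
    (List.range ((board.getD i []).length - 1)).foldl (fun g j =>
      let row := board.getD i []
      let nxt := board.getD (i+1) []
      match nxt[j]? with
      | none => g                       -- IndexError → continue
      | some b =>
        if row.getD j "" == b then
          match nxt[j+1]? with
          | none => g                   -- IndexError → continue
          | some c =>
            if b == c && c == row.getD (j+1) "" then
              ((((g.modify i (fun r => r.modify j (fun _ => "*"))).modify (i+1)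
                  (fun r => r.modify j (fun _ => "*"))).modify i
                  (fun r => r.modify (j+1) (fun _ => "*"))).modify (i+1)
                  (fun r => r.modify (j+1) (fun _ => "*")))
            else g
        else g) g) init

-- ===== PORT B =====
-- Source B's `uni(i, j)`: is (i, j) the top-left corner of a uniform in-bounds 2x2 block?
-- i, j are Int: B calls it with i-1 / j-1, which can be -1 (then the bounds test fails).
def pvUni (board : List (List String)) (i j : Int) : Bool :=
  if 0 ≤ i ∧ i < (board.length : Int) - 1 then
    let row := board.getD i.toNat []
    let nxt := board.getD (i.toNat + 1) []
    if 0 ≤ j ∧ j < (row.length : Int) - 1 ∧ j + 1 < (nxt.length : Int) then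
      -- chained comparison row[j] == row[j+1] == nxt[j] == nxt[j+1]; indices in range by the guards
      row.getD j.toNat "" == row.getD (j.toNat + 1) "" &&
      row.getD (j.toNat + 1) "" == nxt.getD j.toNat "" &&
      nxt.getD j.toNat "" == nxt.getD (j.toNat + 1) ""
    else false
  else false

def get_remove_target_alt (board : List (List String)) : List (List String) :=
  (PySem.List.enumerate board).map (fun p =>
    (List.range p.2.length).map (fun (j : Nat) =>
      if pvUni board (p.1 - 1) ((j : Int) - 1) || pvUni board (p.1 - 1) (j : Int) ||
         pvUni board p.1 ((j : Int) - 1) || pvUni board p.1 (j : Int)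
      then "*" else " "))

-- ===== PRECONDITION & SPEC =====
def Spec_get_remove_target (board : List (List String)) (out : List (List String)) : Prop := out = get_remove_target_alt board
instance (board : List (List String)) (out : List (List String)) : Decidable (Spec_get_remove_target board out) := by unfold Spec_get_remove_target; infer_instance

-- ===== CLAIM (what is proved, stated in full; the proofs are below) =====
def Claim_equal_get_remove_target : Prop := ∀ (board : List (List String)), Dom_get_remove_target board → Spec_get_remove_target board (get_remove_target board)

-- ===== LEMMAS AND PROOFS =====

-- proof-only helpers: A's fold rephrased as a fold of a marking step over the corner list
def pvCondA (board : List (List String)) (i j : Nat) : Bool :=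
  let row := board.getD i []
  let nxt := board.getD (i+1) []
  decide (j + 1 < nxt.length) &&
    (row.getD j "" == nxt.getD j "" && nxt.getD j "" == nxt.getD (j+1) "" &&
     nxt.getD (j+1) "" == row.getD (j+1) "")

def pvCorners (board : List (List String)) : List (Nat × Nat) :=
  (List.range (board.length - 1)).flatMap (fun i =>
    ((List.range ((board.getD i []).length - 1)).filter (fun j => pvCondA board i j)).map
      (fun j => (i, j)))

def pvMark (g : List (List String)) (p : Nat × Nat) : List (List String) :=
  ((((g.modify p.1 (fun r => r.modify p.2 (fun _ => "*"))).modify (p.1+1)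
      (fun r => r.modify p.2 (fun _ => "*"))).modify p.1
      (fun r => r.modify (p.2+1) (fun _ => "*"))).modify (p.1+1)
      (fun r => r.modify (p.2+1) (fun _ => "*")))

def pvCovers (p : Nat × Nat) (r c : Nat) : Bool :=
  (p.1 = r || p.1 + 1 = r) && (p.2 = c || p.2 + 1 = c)

def pvCell (g : List (List String)) (r c : Nat) : Option String :=
  (g[r]?).bind (fun row => row[c]?)

lemma pv_foldl_if_filter {α β : Type} (f : β → α → β) (p : α → Bool) (l : List α) (g : β) :
    l.foldl (fun g x => if p x then f g x else g) g = (l.filter p).foldl f g := by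
  induction l generalizing g with
  | nil => rfl
  | cons x xs ih => by_cases h : p x <;> simp [h, ih]

lemma pv_foldl_flatMap {α β γ : Type} (f : γ → β → γ) (h : α → List β) (l : List α) (g : γ) :
    (l.flatMap h).foldl f g = l.foldl (fun g x => (h x).foldl f g) g := by
  induction l generalizing g with
  | nil => rfl
  | cons x xs ih => simp [List.flatMap_cons, List.foldl_append, ih]

-- A's try/and-chain on one cell pair equals the closed condition pvCondA
lemma pv_step_eq {β : Type} (row nxt : List String) (j : Nat) (mark skip : β) :
    (match nxt[j]? with
     | none => skip
     | some b =>
       if row.getD j "" == b then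
         match nxt[j+1]? with
         | none => skip
         | some c =>
           if b == c && c == row.getD (j+1) "" then mark else skip
       else skip)
    = (if (decide (j + 1 < nxt.length) &&
          (row.getD j "" == nxt.getD j "" && nxt.getD j "" == nxt.getD (j+1) "" &&
           nxt.getD (j+1) "" == row.getD (j+1) "")) then mark else skip) := by
  rcases hj : nxt[j]? with _ | b
  · have hlen : nxt.length ≤ j := List.getElem?_eq_none_iff.mp hj
    have : ¬ j + 1 < nxt.length := by omega
    simp [this]
  · rcases hj1 : nxt[j+1]? with _ | c
    · have hlen : nxt.length ≤ j + 1 := List.getElem?_eq_none_iff.mp hj1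
      have hn : ¬ j + 1 < nxt.length := by omega
      by_cases hab : row.getD j "" = b <;> simp [hn]
    · have hlt : j + 1 < nxt.length := by
        rcases Nat.lt_or_ge (j+1) nxt.length with h | h
        · exact h
        · simp [List.getElem?_eq_none_iff.mpr h] at hj1
      have hb : nxt.getD j "" = b := by simp [List.getD_eq_getElem?_getD, hj]
      have hc : nxt.getD (j+1) "" = c := by simp [List.getD_eq_getElem?_getD, hj1]
      rw [hb, hc]
      simp only [hlt, decide_true, Bool.true_and]
      split_ifs <;> simp_all

-- A's whole computation is the fold of pvMark over the corner list
lemma pv_A_eq_fold (board : List (List String)) :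
    get_remove_target board
      = (pvCorners board).foldl pvMark
          ((List.range board.length).map (fun i => List.replicate (board.getD i []).length " ")) := by
  simp only [get_remove_target, pvCorners]
  rw [pv_foldl_flatMap]
  apply PySem.List.foldl_congr_mem
  intro g i _
  rw [List.foldl_map, ← pv_foldl_if_filter]
  apply PySem.List.foldl_congr_mem
  intro g' j _
  rw [pv_step_eq (board.getD i []) (board.getD (i+1) []) j]
  simp only [pvCondA, pvMark]

-- cell view of one modify
lemma pv_cell_modify (g : List (List String)) (r0 c0 r c : Nat) :
    pvCell (g.modify r0 (fun row => row.modify c0 (fun _ => "*"))) r c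
      = if r = r0 ∧ c = c0 then (pvCell g r c).map (fun _ => "*") else pvCell g r c := by
  cases h : g[r]? with
  | none => simp [pvCell, List.getElem?_modify, h]
  | some row =>
    by_cases hr : r0 = r
    · by_cases hc : c0 = c
      · cases h2 : row[c]? <;>
          simp [pvCell, List.getElem?_modify, h, hr, hc, h2]
      · cases h2 : row[c]? <;>
          simp [pvCell, List.getElem?_modify, h, hr, hc, h2,
            fun hh : r = r0 ∧ c = c0 => hc hh.2.symm] <;>
          (intro hcc; exact absurd hcc.symm hc)
    · simp only [pvCell, List.getElem?_modify, h, Option.map_some, Option.bind_some,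
        if_neg hr]
      rw [if_neg (fun hh : r = r0 ∧ c = c0 => hr hh.1.symm)]
      simp [pvCell, h]

-- cell view of marking one corner
lemma pv_cell_mark (g : List (List String)) (p : Nat × Nat) (r c : Nat) :
    pvCell (pvMark g p) r c
      = if pvCovers p r c then (pvCell g r c).map (fun _ => "*") else pvCell g r c := by
  simp only [pvMark, pv_cell_modify, pvCovers]
  rcases pvCell g r c with _ | v <;>
    · by_cases h1 : p.1 = r <;> by_cases h2 : p.1 + 1 = r <;>
      by_cases h3 : p.2 = c <;> by_cases h4 : p.2 + 1 = c <;>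
      simp [h1, h2, h3, h4] <;> split_ifs <;> simp_all <;> omega

-- cell view of the whole fold
lemma pv_cell_fold (L : List (Nat × Nat)) (g : List (List String)) (r c : Nat) :
    pvCell (L.foldl pvMark g) r c
      = if L.any (fun p => pvCovers p r c) then (pvCell g r c).map (fun _ => "*")
        else pvCell g r c := by
  induction L generalizing g with
  | nil => simp
  | cons p L ih =>
    simp only [List.foldl_cons, ih, pv_cell_mark, List.any_cons]
    by_cases hp : pvCovers p r c <;> by_cases hL : L.any (fun q => pvCovers q r c) <;>
      rcases pvCell g r c with _ | v <;> simp [hp, hL]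

-- the fold preserves the row-length profile
lemma pv_rows_fold (L : List (Nat × Nat)) (g : List (List String)) :
    (L.foldl pvMark g).map List.length = g.map List.length := by
  induction L generalizing g with
  | nil => rfl
  | cons p L ih =>
    rw [List.foldl_cons, ih]
    simp only [pvMark]
    apply List.ext_getElem
    · simp
    · intro r h1 h2
      simp [List.getElem_map, List.getElem_modify]
      split_ifs <;> simp

-- corner membership ↔ the closed Bool condition
def pvUniNat (board : List (List String)) (a b : Nat) : Bool :=
  decide (a + 1 < board.length) && decide (b + 1 < (board.getD a []).length) && pvCondA board a b

lemma pv_mem_corners (board : List (List String)) (p : Nat × Nat) :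
    p ∈ pvCorners board ↔ pvUniNat board p.1 p.2 = true := by
  rcases p with ⟨a, b⟩
  simp only [pvCorners, List.mem_flatMap, List.mem_map, List.mem_filter, List.mem_range,
    pvUniNat]
  constructor
  · rintro ⟨i, hi, j, ⟨hj, hc⟩, h⟩
    cases h
    simp_all; omega
  · rintro h
    simp only [Bool.and_eq_true, decide_eq_true_eq] at h
    exact ⟨a, by omega, b, ⟨by omega, h.2⟩, rfl⟩

-- pvUni at Nat coordinates is pvUniNat; at negative coordinates it is false
lemma pv_uni_nat (board : List (List String)) (a b : Nat) :
    pvUni board (a : Int) (b : Int) = pvUniNat board a b := by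
  simp only [pvUni, pvUniNat, pvCondA, Int.toNat_natCast]
  by_cases h1 : a + 1 < board.length
  · rw [if_pos (by constructor <;> [positivity; (push_cast; omega)])]
    by_cases hbc : b + 1 < (board.getD a []).length ∧ b + 1 < (board.getD (a+1) []).length
    · obtain ⟨h2, h3⟩ := hbc
      rw [if_pos ⟨by positivity, by push_cast; omega, by push_cast; omega⟩]
      simp only [h1, h2, h3, decide_true, Bool.true_and]
      cases hx : (board.getD a []).getD b "" == (board.getD a []).getD (b+1) "" <;>
      cases hy : (board.getD a []).getD b "" == (board.getD (a+1) []).getD b "" <;>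
      cases hz : (board.getD a []).getD (b+1) "" == (board.getD (a+1) []).getD b "" <;>
      cases hw : (board.getD (a+1) []).getD b "" == (board.getD (a+1) []).getD (b+1) "" <;>
      cases hv : (board.getD (a+1) []).getD (b+1) "" == (board.getD a []).getD (b+1) "" <;>
        simp_all [beq_iff_eq] <;> simp_all [eq_comm]
    · rw [if_neg (by push_cast; omega)]
      rcases not_and_or.mp hbc with h | h
      · rw [show decide (b + 1 < (board.getD a []).length) = false by simpa using h]
        simp
      · rw [show decide (b + 1 < (board.getD (a+1) []).length) = false by simpa using h]
        simp
  · rw [if_neg (by push_cast; omega)]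
    simp [h1]

lemma pv_uni_neg_fst (board : List (List String)) (j : Int) :
    pvUni board (-1) j = false := by
  unfold pvUni
  rw [if_neg (by omega)]

lemma pv_uni_neg_snd (board : List (List String)) (i : Int) :
    pvUni board i (-1) = false := by
  unfold pvUni
  by_cases h1 : 0 ≤ i ∧ i < (board.length : Int) - 1
  · rw [if_pos h1, if_neg (by omega)]
  · rw [if_neg h1]

-- "some corner covers (r,c)" ↔ B's four-way gather at (r,c)
lemma pv_any_covers (board : List (List String)) (r c : Nat) :
    (pvCorners board).any (fun p => pvCovers p r c)
      = (pvUni board ((r : Int) - 1) ((c : Int) - 1) || pvUni board ((r : Int) - 1) (c : Int) ||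
         pvUni board (r : Int) ((c : Int) - 1) || pvUni board (r : Int) (c : Int)) := by
  rw [Bool.eq_iff_iff]
  constructor
  · intro hany
    rcases List.any_eq_true.mp hany with ⟨⟨a, b⟩, hmem, hcov⟩
    have hu : pvUni board (a : Int) (b : Int) = true := by
      rw [pv_uni_nat]; exact (pv_mem_corners board (a, b)).mp hmem
    simp only [pvCovers, Bool.and_eq_true, Bool.or_eq_true, decide_eq_true_eq] at hcov
    obtain ⟨ha, hb⟩ := hcov
    simp only [Bool.or_eq_true]
    rcases ha with ha | ha <;> rcases hb with hb | hb
    · refine Or.inr ?_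
      rwa [show ((r : Int)) = (a : Int) by omega, show ((c : Int)) = (b : Int) by omega]
    · refine Or.inl (Or.inr ?_)
      rwa [show ((r : Int)) = (a : Int) by omega, show ((c : Int) - 1) = (b : Int) by omega]
    · refine Or.inl (Or.inl (Or.inr ?_))
      rwa [show ((r : Int) - 1) = (a : Int) by omega, show ((c : Int)) = (b : Int) by omega]
    · refine Or.inl (Or.inl (Or.inl ?_))
      rwa [show ((r : Int) - 1) = (a : Int) by omega, show ((c : Int) - 1) = (b : Int) by omega]
  · intro hor
    rw [List.any_eq_true]
    have mk : ∀ a b : Nat, pvUni board (a : Int) (b : Int) = true →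
        (a = r ∨ a + 1 = r) → (b = c ∨ b + 1 = c) →
        ∃ p ∈ pvCorners board, pvCovers p r c = true := by
      intro a b hu ha hb
      refine ⟨(a, b), (pv_mem_corners board (a, b)).mpr (by rw [← pv_uni_nat]; exact hu), ?_⟩
      unfold pvCovers
      rcases ha with ha | ha <;> rcases hb with hb | hb <;> simp [ha, hb]
    have hr1 : ∀ j : Int, pvUni board ((r : Int) - 1) j = true → 1 ≤ r := by
      intro j hj
      rcases Nat.eq_zero_or_pos r with h0 | h0
      · rw [h0] at hj; norm_num [pv_uni_neg_fst] at hj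
      · omega
    have hc1 : ∀ i : Int, pvUni board i ((c : Int) - 1) = true → 1 ≤ c := by
      intro i hi
      rcases Nat.eq_zero_or_pos c with h0 | h0
      · rw [h0] at hi; norm_num [pv_uni_neg_snd] at hi
      · omega
    simp only [Bool.or_eq_true] at hor
    rcases hor with ((u1 | u2) | u3) | u4
    · have hr := hr1 _ u1; have hc := hc1 _ u1
      rw [show ((r : Int) - 1) = ((r - 1 : Nat) : Int) by push_cast [hr]; ring,
          show ((c : Int) - 1) = ((c - 1 : Nat) : Int) by push_cast [hc]; ring] at u1
      exact mk _ _ u1 (Or.inr (by omega)) (Or.inr (by omega))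
    · have hr := hr1 _ u2
      rw [show ((r : Int) - 1) = ((r - 1 : Nat) : Int) by push_cast [hr]; ring] at u2
      exact mk _ _ u2 (Or.inr (by omega)) (Or.inl rfl)
    · have hc := hc1 _ u3
      rw [show ((c : Int) - 1) = ((c - 1 : Nat) : Int) by push_cast [hc]; ring] at u3
      exact mk _ _ u3 (Or.inl rfl) (Or.inr (by omega))
    · exact mk _ _ u4 (Or.inl rfl) (Or.inl rfl)

-- ===== VERDICT (by name: the statement is the Claim_ definition above) =====
theorem get_remove_target_spec : Claim_equal_get_remove_target := by
  intro board _
  show get_remove_target board = get_remove_target_alt board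
  rw [pv_A_eq_fold]
  have hrows := pv_rows_fold (pvCorners board)
      ((List.range board.length).map (fun i => List.replicate (board.getD i []).length " "))
  have hFlen : ((pvCorners board).foldl pvMark
      ((List.range board.length).map (fun i => List.replicate (board.getD i []).length " "))).length
      = board.length := by
    have := congrArg List.length hrows
    simpa using this
  have haltlen : (get_remove_target_alt board).length = board.length := by
    simp [get_remove_target_alt, PySem.List.length_enumerate]
  apply List.ext_getElem (by rw [hFlen, haltlen])
  intro r h1 h2
  have hrb : r < board.length := by rwa [hFlen] at h1
  have hgetD : board.getD r [] = board[r]'hrb := by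
    simp [List.getD_eq_getElem?_getD, List.getElem?_eq_getElem hrb]
  have hrlen : (((pvCorners board).foldl pvMark
      ((List.range board.length).map (fun i => List.replicate (board.getD i []).length " ")))[r]'h1).length
      = (board[r]'hrb).length := by
    have e1 := congrArg (fun l => l[r]?) hrows
    simp only [List.getElem?_map, List.getElem?_eq_getElem h1, List.getElem?_range, hrb,
      if_pos, Option.map_some, List.length_replicate] at e1
    rw [← hgetD]
    exact Option.some.inj e1
  have haltrowlen : ((get_remove_target_alt board)[r]'h2).length = (board[r]'hrb).length := by
    simp only [get_remove_target_alt, List.getElem_map, List.length_map, List.length_range,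
      PySem.List.getElem_enumerate]
  apply List.ext_getElem (by rw [hrlen, haltrowlen])
  intro c hc1 hc2
  have hcb : c < (board[r]'hrb).length := by rwa [hrlen] at hc1
  have hcell : pvCell ((pvCorners board).foldl pvMark
        ((List.range board.length).map (fun i => List.replicate (board.getD i []).length " "))) r c
      = some ((((pvCorners board).foldl pvMark
          ((List.range board.length).map (fun i => List.replicate (board.getD i []).length " ")))[r]'h1)[c]'hc1) := by
    unfold pvCell
    rw [List.getElem?_eq_getElem h1, Option.bind_some, List.getElem?_eq_getElem hc1]
  have hinitcell : pvCell ((List.range board.length).map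
        (fun i => List.replicate (board.getD i []).length " ")) r c = some " " := by
    unfold pvCell
    rw [List.getElem?_map, List.getElem?_range hrb, Option.map_some, Option.bind_some,
      List.getElem?_replicate, if_pos (by rw [hgetD]; exact hcb)]
  have hfold := pv_cell_fold (pvCorners board)
      ((List.range board.length).map (fun i => List.replicate (board.getD i []).length " ")) r c
  rw [hcell, hinitcell] at hfold
  have hrhs : ((get_remove_target_alt board)[r]'h2)[c]'hc2
      = if (pvCorners board).any (fun p => pvCovers p r c) then "*" else " " := by
    rw [pv_any_covers]
    simp only [get_remove_target_alt, List.getElem_map, List.getElem_range,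
      PySem.List.getElem_enumerate]
    norm_num
  rw [hrhs]
  cases hA : (pvCorners board).any (fun p => pvCovers p r c) <;>
    rw [hA] at hfold <;> simpa using hfold
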